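-- pv_equiv track=rewrite | github.com/kaki1013/AtCoder | AtCoder Beginner Contest/208/208_F.py | solve
-- ===== SOURCE A (Python) =====
-- def solve(dp, n, m):
--     if dp[m][n] != -1:
--         return dp[m][n]
--     if dp[m-1][n] != -1 and dp[m][n-1] != -1:
--         dp[m][n] = (dp[m-1][n] + dp[m][n-1]) % (10**9+7)
--         return dp[m][n]
--     else:
--         dp[m-1][n] = solve(dp, n, m-1)
--         dp[m][n-1] = solve(dp, n-1, m)
--         dp[m][n] = (dp[m-1][n] + dp[m][n-1]) % (10**9+7)
--         return dp[m][n]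
-- ===== SOURCE B (Python) =====
-- def solve(dp, n, m):
--     # Bottom-up iterative DP instead of memoized recursion.
--     # NOTE: like A, this mutates dp in place; the set of cells it fills can
--     # differ from A's (it fills every -1 cell of the [0..m]x[0..n] rectangle),
--     # only the return value is claimed equal.
--     if dp[m][n] != -1:
--         return dp[m][n]
--     MOD = 10 ** 9 + 7
--     for i in range(m + 1):
--         for j in range(n + 1):
--             if dp[i][j] == -1:
--                 dp[i][j] = (dp[i - 1][j] + dp[i][j - 1]) % MOD
--     return dp[m][n]
-- ===== Notes on version B (the rewrite author's own statement) =====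
-- stated objective: alternative
-- what changed: Replaces the memoized top-down recursion (with its per-cell neighbour checks and Python recursion depth) by a bottom-up row-major loop that fills every -1 cell of the [0..m]x[0..n] rectangle once; same asymptotic cost, no recursion.
-- outside the precondition, e.g. on solve([[-1, 1], [1, -1]], -1, -1): A returns 2, B returns -1; on solve([[-1, 2], [3, -1]], 1, 1): A returns 5, B returns 5
import Mathlib
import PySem

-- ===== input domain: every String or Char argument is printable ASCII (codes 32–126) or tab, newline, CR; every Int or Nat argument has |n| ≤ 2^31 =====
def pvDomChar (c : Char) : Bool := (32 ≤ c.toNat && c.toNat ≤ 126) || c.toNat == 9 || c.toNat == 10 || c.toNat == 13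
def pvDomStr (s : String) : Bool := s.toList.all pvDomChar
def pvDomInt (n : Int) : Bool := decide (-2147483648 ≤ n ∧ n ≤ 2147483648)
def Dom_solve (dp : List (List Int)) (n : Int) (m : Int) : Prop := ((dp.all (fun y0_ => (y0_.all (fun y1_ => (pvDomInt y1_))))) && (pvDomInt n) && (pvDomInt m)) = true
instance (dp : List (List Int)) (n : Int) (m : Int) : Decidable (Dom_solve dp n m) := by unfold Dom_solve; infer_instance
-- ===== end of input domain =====

-- B replaces A's memoized top-down recursion by a bottom-up row-major loop over the
-- [0..m]x[0..n] rectangle (same cost); both Pythons mutate dp in place (possibly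
-- different cells) — only the RETURN value is claimed equal, on Pre_solve.

-- shared low-level indexing helpers (Python dp[i][j] read / write, with wraparound)
def pyGet2 (dp : List (List Int)) (i j : Int) : Option Int :=
  (PySem.List.pyGet? dp i).bind fun row => PySem.List.pyGet? row j

def pySet2 (dp : List (List Int)) (i j : Int) (v : Int) : List (List Int) :=
  match PySem.List.pyGet? dp i with
  | none => dp
  | some row =>
    match PySem.List.pySet? row j v with
    | none => dp
    | some row' => PySem.List.pySetD dp i row'

-- ===== PORT A =====
-- A's recursion is made total with a fuel counter (a totality guard only: inside
-- Pre_solve the fuel n.toNat + m.toNat + 1 is never exhausted); the mutated table is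
-- threaded explicitly as state.
def solveA : Nat → List (List Int) → Int → Int → Int × List (List Int)
  | 0, dp, _, _ => (0, dp)
  | fuel + 1, dp, n, m =>
    match pyGet2 dp m n with
    | none => (0, dp)
    | some v =>
      if v ≠ -1 then (v, dp)
      else
        match pyGet2 dp (m - 1) n, pyGet2 dp m (n - 1) with
        | none, _ => (0, dp)
        | _, none => (0, dp)
        | some a, some b =>
          if a ≠ -1 ∧ b ≠ -1 then
            let w := PySem.Int.mod (a + b) 1000000007
            (w, pySet2 dp m n w)
          else
            let r1 := solveA fuel dp n (m - 1)
            let dp2 := pySet2 r1.2 (m - 1) n r1.1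
            let r2 := solveA fuel dp2 (n - 1) m
            let dp4 := pySet2 r2.2 m (n - 1) r2.1
            match pyGet2 dp4 (m - 1) n, pyGet2 dp4 m (n - 1) with
            | some a', some b' =>
              let w := PySem.Int.mod (a' + b') 1000000007
              (w, pySet2 dp4 m n w)
            | _, _ => (0, dp4)

def solve (dp : List (List Int)) (n : Int) (m : Int) : Int :=
  (solveA (n.toNat + m.toNat + 1) dp n m).1

-- ===== PORT B =====
-- loop bodies of Source B's two nested for-loops, as named helpers
def stepB (acc2 : List (List Int)) (i j : Int) : List (List Int) :=
  match pyGet2 acc2 i j with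
  | none => acc2
  | some c =>
    if c = -1 then
      match pyGet2 acc2 (i - 1) j, pyGet2 acc2 i (j - 1) with
      | some a, some b => pySet2 acc2 i j (PySem.Int.mod (a + b) 1000000007)
      | _, _ => acc2
    else acc2

def innerB (n : Int) (acc : List (List Int)) (i : Int) : List (List Int) :=
  (PySem.List.pyRange 0 (n + 1) 1).foldl (fun acc2 j => stepB acc2 i j) acc

def solve_alt (dp : List (List Int)) (n : Int) (m : Int) : Int :=
  match pyGet2 dp m n with
  | none => 0
  | some v =>
    if v ≠ -1 then v
    else
      let dp' := (PySem.List.pyRange 0 (m + 1) 1).foldl (innerB n) dp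
      match pyGet2 dp' m n with
      | some v' => v'
      | none => 0

-- ===== PRECONDITION & SPEC =====
-- dp[i][j] with in-range Nat indices (used by Pre_solve and the proofs)
def cellAt (dp : List (List Int)) (i j : Nat) : Int := (dp.getD i []).getD j 0

-- Pre_solve admits any in-range (possibly negative, Python-wrapping) m, n when dp[m][n]
-- is already cached (≠ -1: both programs simply return it); otherwise it requires
-- 0 ≤ m, 0 ≤ n with a filled base row / base column, and excludes the remaining inputs,
-- on which A's recursion either raises IndexError or sums cells reached through
-- negative-index wraparound — an accident of the memo layout.
def Pre_solve (dp : List (List Int)) (n : Int) (m : Int) : Prop :=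
  PySem.Raise.InRange dp.length m ∧
  PySem.Raise.InRange (PySem.List.pyGetD dp m []).length n ∧
  (PySem.List.pyGetD (PySem.List.pyGetD dp m []) n 0 ≠ -1 ∨
    (0 ≤ m ∧ 0 ≤ n ∧ (∀ row ∈ dp, n.toNat < row.length) ∧
     (∀ j ≤ n.toNat, cellAt dp 0 j ≠ -1) ∧ (∀ i ≤ m.toNat, cellAt dp i 0 ≠ -1)))

instance (dp : List (List Int)) (n : Int) (m : Int) : Decidable (Pre_solve dp n m) := by
  unfold Pre_solve; infer_instance

def pvWitness_solve : List (List Int) × Int × Int := ([[0, 1], [1, -1]], 1, 1)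

def Spec_solve (dp : List (List Int)) (n : Int) (m : Int) (out : Int) : Prop := out = solve_alt dp n m
instance (dp : List (List Int)) (n : Int) (m : Int) (out : Int) : Decidable (Spec_solve dp n m out) := by unfold Spec_solve; infer_instance

-- ===== CLAIM (what is proved, stated in full; the proofs are below) =====
def Claim_equal_solve : Prop := ∀ (dp : List (List Int)) (n : Int) (m : Int), Dom_solve dp n m → Pre_solve dp n m → Spec_solve dp n m (solve dp n m)

-- ===== LEMMAS AND PROOFS =====

-- the pure value of the DP recurrence, relative to a fixed (unmutated) table
def gval (dp : List (List Int)) (i j : Nat) : Int :=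
  if cellAt dp i j ≠ -1 then cellAt dp i j
  else if i = 0 ∨ j = 0 then 0
  else PySem.Int.mod (gval dp (i - 1) j + gval dp i (j - 1)) 1000000007
  termination_by i + j
  decreasing_by all_goals omega

theorem gval_ne_neg_one (dp : List (List Int)) (i j : Nat) : gval dp i j ≠ -1 := by
  rw [gval]
  split_ifs with h1 h2
  · exact h1
  · omega
  · have h := PySem.Int.mod_nonneg (gval dp (i - 1) j + gval dp i (j - 1))
      (b := 1000000007) (by norm_num)
    omega

def tblSet (dp : List (List Int)) (i j : Nat) (v : Int) : List (List Int) :=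
  dp.set i ((dp.getD i []).set j v)

theorem cellAt_eq (dp : List (List Int)) (i j : Nat) :
    cellAt dp i j = (dp[i]?.getD [])[j]?.getD 0 := by
  simp [cellAt, List.getD_eq_getElem?_getD]

theorem cellAt_tblSet (dp : List (List Int)) (i j : Nat) (v : Int) (a b : Nat)
    (hi : i < dp.length) (hj : j < (dp.getD i []).length) :
    cellAt (tblSet dp i j v) a b = if a = i ∧ b = j then v else cellAt dp a b := by
  have hrow : dp.getD i [] = dp[i] := by
    rw [List.getD_eq_getElem?_getD, List.getElem?_eq_getElem hi]; rfl
  simp only [cellAt_eq, tblSet, List.getElem?_set]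
  by_cases hia : a = i
  · subst hia
    by_cases hbj : b = j
    · subst hbj
      simp [hi, hrow ▸ hj]
    · simp [hi, hbj, Ne.symm hbj]
  · simp [Ne.symm hia, hia]

theorem length_tblSet (dp : List (List Int)) (i j : Nat) (v : Int) :
    (tblSet dp i j v).length = dp.length := by simp [tblSet]

theorem rowlen_tblSet (dp : List (List Int)) (i j : Nat) (v : Int) (a : Nat)
    (hi : i < dp.length) :
    ((tblSet dp i j v).getD a []).length = (dp.getD a []).length := by
  have hrow : dp.getD i [] = dp[i] := by
    rw [List.getD_eq_getElem?_getD, List.getElem?_eq_getElem hi]; rfl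
  simp only [tblSet, List.getD_eq_getElem?_getD, List.getElem?_set]
  by_cases hia : a = i
  · subst hia; simp [hi]
  · simp [Ne.symm hia]

theorem pyGet2_nat (dp : List (List Int)) (i j : Nat)
    (hi : i < dp.length) (hj : j < (dp.getD i []).length) :
    pyGet2 dp (i : Int) (j : Int) = some (cellAt dp i j) := by
  have hrow : dp.getD i [] = dp[i] := by
    rw [List.getD_eq_getElem?_getD, List.getElem?_eq_getElem hi]; rfl
  unfold pyGet2
  rw [PySem.List.pyGet?_natCast, List.getElem?_eq_getElem hi, Option.bind_some,
    PySem.List.pyGet?_natCast, cellAt_eq, List.getElem?_eq_getElem hi]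
  have hj' : j < dp[i].length := hrow ▸ hj
  simp [List.getElem?_eq_getElem hj']

theorem pySet2_nat (dp : List (List Int)) (i j : Nat) (v : Int)
    (hi : i < dp.length) (hj : j < (dp.getD i []).length) :
    pySet2 dp (i : Int) (j : Int) v = tblSet dp i j v := by
  have hrow : dp.getD i [] = dp[i] := by
    rw [List.getD_eq_getElem?_getD, List.getElem?_eq_getElem hi]; rfl
  have hj' : j < dp[i].length := hrow ▸ hj
  unfold pySet2
  rw [PySem.List.pyGet?_natCast, List.getElem?_eq_getElem hi]
  dsimp only
  rw [PySem.List.pySet?_natCast _ _ _ hj']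
  dsimp only
  rw [PySem.List.pySetD_natCast]
  unfold tblSet
  rw [hrow]

def TblExt (dp0 dp : List (List Int)) : Prop :=
  dp.length = dp0.length ∧ (∀ i : Nat, (dp.getD i []).length = (dp0.getD i []).length) ∧
  ∀ i j : Nat, cellAt dp i j = cellAt dp0 i j ∨ (cellAt dp0 i j = -1 ∧ cellAt dp i j = gval dp0 i j)

def TblMono (dp dp' : List (List Int)) : Prop :=
  ∀ i j : Nat, cellAt dp i j ≠ -1 → cellAt dp' i j = cellAt dp i j

theorem tblMono_refl (dp : List (List Int)) : TblMono dp dp := fun _ _ _ => rfl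

theorem tblMono_trans {dp1 dp2 dp3 : List (List Int)} (h1 : TblMono dp1 dp2)
    (h2 : TblMono dp2 dp3) : TblMono dp1 dp3 := by
  intro i j h
  rw [h2 i j (by rw [h1 i j h]; exact h), h1 i j h]

theorem tblExt_refl (dp0 : List (List Int)) : TblExt dp0 dp0 :=
  ⟨rfl, fun _ => rfl, fun _ _ => Or.inl rfl⟩

theorem tblExt_set (dp0 dp : List (List Int)) (i j : Nat) (h : TblExt dp0 dp)
    (hi : i < dp.length) (hj : j < (dp.getD i []).length) :
    TblExt dp0 (tblSet dp i j (gval dp0 i j)) := by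
  obtain ⟨hl, hr, hc⟩ := h
  refine ⟨by rw [length_tblSet, hl], fun a => by rw [rowlen_tblSet _ _ _ _ _ hi]; exact hr a, ?_⟩
  intro a b
  rw [cellAt_tblSet dp i j _ a b hi hj]
  split_ifs with hab
  · obtain ⟨rfl, rfl⟩ := hab
    by_cases h0 : cellAt dp0 a b = -1
    · exact Or.inr ⟨h0, rfl⟩
    · left; rw [gval, if_pos h0]
  · exact hc a b

theorem tblMono_set (dp : List (List Int)) (i j : Nat) (v : Int)
    (hi : i < dp.length) (hj : j < (dp.getD i []).length)
    (hm1 : cellAt dp i j ≠ -1 → v = cellAt dp i j) :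
    TblMono dp (tblSet dp i j v) := by
  intro a b hne
  rw [cellAt_tblSet dp i j _ a b hi hj]
  split_ifs with hab
  · obtain ⟨rfl, rfl⟩ := hab
    exact hm1 hne
  · rfl

-- a cell that is ≠ -1 in a TblExt table holds exactly gval dp0
theorem cell_eq_gval_of_ne (dp0 dp : List (List Int)) (h : TblExt dp0 dp) (i j : Nat)
    (hne : cellAt dp i j ≠ -1) : cellAt dp i j = gval dp0 i j := by
  rcases h.2.2 i j with hceq | ⟨h0, hg⟩
  · rw [hceq] at hne ⊢
    rw [gval, if_pos hne]
  · exact hg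

-- a cell that IS -1 in a TblExt table is -1 in dp0 too
theorem cell0_of_cell_neg_one (dp0 dp : List (List Int)) (h : TblExt dp0 dp) (i j : Nat)
    (heq : cellAt dp i j = -1) : cellAt dp0 i j = -1 := by
  rcases h.2.2 i j with hceq | ⟨h0, hg⟩
  · rw [← hceq]; exact heq
  · exact h0

theorem gval_rec (dp0 : List (List Int)) (m n : Nat) (h0 : cellAt dp0 m n = -1)
    (hm : m ≠ 0) (hn : n ≠ 0) :
    gval dp0 m n = PySem.Int.mod (gval dp0 (m - 1) n + gval dp0 m (n - 1)) 1000000007 := by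
  rw [gval, if_neg (by omega), if_neg (by omega)]

theorem solveA_main (dp0 : List (List Int)) (M N : Nat)
    (hM : M < dp0.length) (hN : ∀ row ∈ dp0, N < row.length)
    (hbr : ∀ j ≤ N, cellAt dp0 0 j ≠ -1) (hbc : ∀ i ≤ M, cellAt dp0 i 0 ≠ -1) :
    ∀ fuel (m n : Nat) (dp : List (List Int)), m ≤ M → n ≤ N → m + n < fuel → TblExt dp0 dp →
      (solveA fuel dp (n : Int) (m : Int)).1 = gval dp0 m n ∧
      TblExt dp0 (solveA fuel dp (n : Int) (m : Int)).2 ∧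
      TblMono dp (solveA fuel dp (n : Int) (m : Int)).2 := by
  have hin : ∀ (dp : List (List Int)), TblExt dp0 dp → ∀ a b : Nat, a ≤ M → b ≤ N →
      a < dp.length ∧ b < (dp.getD a []).length := by
    intro dp hext a b ha hb
    have ha' : a < dp0.length := by omega
    have hrow : dp0.getD a [] = dp0[a] := by
      rw [List.getD_eq_getElem?_getD, List.getElem?_eq_getElem ha']; rfl
    have hb' := hN dp0[a] (List.getElem_mem ha')
    refine ⟨by rw [hext.1]; omega, ?_⟩
    rw [hext.2.1 a, hrow]
    omega
  intro fuel
  induction fuel with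
  | zero => intro m n dp _ _ hf _; omega
  | succ fuel ih =>
    intro m n dp hm hn hf hext
    obtain ⟨hi1, hj1⟩ := hin dp hext m n hm hn
    rw [show solveA (fuel + 1) dp (n : Int) (m : Int) =
      (match pyGet2 dp (m : Int) (n : Int) with
        | none => (0, dp)
        | some v =>
          if v ≠ -1 then (v, dp)
          else
            match pyGet2 dp ((m : Int) - 1) (n : Int), pyGet2 dp (m : Int) ((n : Int) - 1) with
            | none, _ => (0, dp)
            | _, none => (0, dp)
            | some a, some b =>
              if a ≠ -1 ∧ b ≠ -1 then
                let w := PySem.Int.mod (a + b) 1000000007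
                (w, pySet2 dp (m : Int) (n : Int) w)
              else
                let r1 := solveA fuel dp (n : Int) ((m : Int) - 1)
                let dp2 := pySet2 r1.2 ((m : Int) - 1) (n : Int) r1.1
                let r2 := solveA fuel dp2 ((n : Int) - 1) (m : Int)
                let dp4 := pySet2 r2.2 (m : Int) ((n : Int) - 1) r2.1
                match pyGet2 dp4 ((m : Int) - 1) (n : Int), pyGet2 dp4 (m : Int) ((n : Int) - 1) with
                | some a', some b' =>
                  let w := PySem.Int.mod (a' + b') 1000000007
                  (w, pySet2 dp4 (m : Int) (n : Int) w)
                | _, _ => (0, dp4)) from rfl]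
    rw [pyGet2_nat dp m n hi1 hj1]
    dsimp only
    by_cases hv : cellAt dp m n ≠ -1
    · rw [if_pos hv]
      exact ⟨(cell_eq_gval_of_ne dp0 dp hext m n hv).symm ▸ rfl, hext, tblMono_refl dp⟩
    · rw [if_neg hv]
      have hveq : cellAt dp m n = -1 := not_not.mp hv
      have h00 : cellAt dp0 m n = -1 := cell0_of_cell_neg_one dp0 dp hext m n hveq
      have hm0 : m ≠ 0 := by rintro rfl; exact hbr n hn h00
      have hn0 : n ≠ 0 := by rintro rfl; exact hbc m hm h00
      have hc1 : ((m : Int) - 1) = ((m - 1 : Nat) : Int) := by omega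
      have hc2 : ((n : Int) - 1) = ((n - 1 : Nat) : Int) := by omega
      rw [hc1, hc2]
      obtain ⟨hi2, hj2⟩ := hin dp hext (m - 1) n (by omega) hn
      obtain ⟨hi3, hj3⟩ := hin dp hext m (n - 1) hm (by omega)
      rw [pyGet2_nat dp (m - 1) n hi2 hj2, pyGet2_nat dp m (n - 1) hi3 hj3]
      dsimp only
      by_cases hab : cellAt dp (m - 1) n ≠ -1 ∧ cellAt dp m (n - 1) ≠ -1
      · rw [if_pos hab]
        have ha := cell_eq_gval_of_ne dp0 dp hext (m - 1) n hab.1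
        have hb := cell_eq_gval_of_ne dp0 dp hext m (n - 1) hab.2
        have hw : PySem.Int.mod (cellAt dp (m - 1) n + cellAt dp m (n - 1)) 1000000007
            = gval dp0 m n := by
          rw [ha, hb, ← gval_rec dp0 m n h00 hm0 hn0]
        rw [pySet2_nat dp m n _ hi1 hj1, hw]
        exact ⟨rfl, tblExt_set dp0 dp m n hext hi1 hj1,
          tblMono_set dp m n _ hi1 hj1 (fun hne => absurd hveq hne)⟩
      · rw [if_neg hab]
        obtain ⟨h1v, h1e, h1m⟩ := ih (m - 1) n dp (by omega) hn (by omega) hext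
        set r1 := solveA fuel dp (n : Int) ((m - 1 : Nat) : Int) with hr1
        obtain ⟨hi2', hj2'⟩ := hin r1.2 h1e (m - 1) n (by omega) hn
        rw [pySet2_nat r1.2 (m - 1) n r1.1 hi2' hj2', h1v]
        set dp2 := tblSet r1.2 (m - 1) n (gval dp0 (m - 1) n) with hdp2
        have h2e : TblExt dp0 dp2 := tblExt_set dp0 r1.2 (m - 1) n h1e hi2' hj2'
        have h2m : TblMono r1.2 dp2 := tblMono_set r1.2 (m - 1) n _ hi2' hj2'
          (fun hne => (cell_eq_gval_of_ne dp0 r1.2 h1e _ _ hne).symm)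
        obtain ⟨h3v, h3e, h3m⟩ := ih m (n - 1) dp2 hm (by omega) (by omega) h2e
        set r2 := solveA fuel dp2 ((n - 1 : Nat) : Int) (m : Int) with hr2
        obtain ⟨hi4, hj4⟩ := hin r2.2 h3e m (n - 1) hm (by omega)
        rw [pySet2_nat r2.2 m (n - 1) r2.1 hi4 hj4, h3v]
        set dp4 := tblSet r2.2 m (n - 1) (gval dp0 m (n - 1)) with hdp4
        have h4e : TblExt dp0 dp4 := tblExt_set dp0 r2.2 m (n - 1) h3e hi4 hj4
        have h4m : TblMono r2.2 dp4 := tblMono_set r2.2 m (n - 1) _ hi4 hj4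
          (fun hne => (cell_eq_gval_of_ne dp0 r2.2 h3e _ _ hne).symm)
        obtain ⟨hi5, hj5⟩ := hin dp4 h4e (m - 1) n (by omega) hn
        obtain ⟨hi6, hj6⟩ := hin dp4 h4e m (n - 1) hm (by omega)
        rw [pyGet2_nat dp4 (m - 1) n hi5 hj5, pyGet2_nat dp4 m (n - 1) hi6 hj6]
        dsimp only
        have hcell2 : cellAt dp2 (m - 1) n = gval dp0 (m - 1) n := by
          rw [hdp2, cellAt_tblSet r1.2 (m - 1) n _ (m - 1) n hi2' hj2', if_pos ⟨rfl, rfl⟩]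
        have hcell3 : cellAt r2.2 (m - 1) n = gval dp0 (m - 1) n := by
          rw [h3m (m - 1) n (by rw [hcell2]; exact gval_ne_neg_one _ _ _), hcell2]
        have ha' : cellAt dp4 (m - 1) n = gval dp0 (m - 1) n := by
          rw [hdp4, cellAt_tblSet r2.2 m (n - 1) _ (m - 1) n hi4 hj4, if_neg (by omega), hcell3]
        have hb' : cellAt dp4 m (n - 1) = gval dp0 m (n - 1) := by
          rw [hdp4, cellAt_tblSet r2.2 m (n - 1) _ m (n - 1) hi4 hj4, if_pos ⟨rfl, rfl⟩]
        rw [ha', hb']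
        obtain ⟨hi7, hj7⟩ := hin dp4 h4e m n hm hn
        have hw : PySem.Int.mod (gval dp0 (m - 1) n + gval dp0 m (n - 1)) 1000000007
            = gval dp0 m n := (gval_rec dp0 m n h00 hm0 hn0).symm
        rw [pySet2_nat dp4 m n _ hi7 hj7, hw]
        refine ⟨rfl, tblExt_set dp0 dp4 m n h4e hi7 hj7, ?_⟩
        have h5m : TblMono dp4 (tblSet dp4 m n (gval dp0 m n)) := tblMono_set dp4 m n _ hi7 hj7
          (fun hne => (cell_eq_gval_of_ne dp0 dp4 h4e m n hne).symm)
        exact tblMono_trans (tblMono_trans (tblMono_trans (tblMono_trans h1m h2m) h3m) h4m) h5m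

def InvB (dp0 dpc : List (List Int)) (N i j : Nat) : Prop :=
  dpc.length = dp0.length ∧ (∀ a : Nat, (dpc.getD a []).length = (dp0.getD a []).length) ∧
  ∀ a b : Nat, (((a < i ∧ b ≤ N) ∨ (a = i ∧ b < j)) → cellAt dpc a b = gval dp0 a b) ∧
               (¬((a < i ∧ b ≤ N) ∨ (a = i ∧ b < j)) → cellAt dpc a b = cellAt dp0 a b)

theorem invB_init (dp0 : List (List Int)) (N : Nat) : InvB dp0 dp0 N 0 0 :=
  ⟨rfl, fun _ => rfl, fun a b => ⟨fun h => by omega, fun _ => rfl⟩⟩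

theorem invB_shift (dp0 dpc : List (List Int)) (N i : Nat)
    (h : InvB dp0 dpc N i (N + 1)) : InvB dp0 dpc N (i + 1) 0 := by
  obtain ⟨h1, h2, h3⟩ := h
  refine ⟨h1, h2, fun a b => ⟨fun hp => (h3 a b).1 (by omega), fun hp => (h3 a b).2 (by omega)⟩⟩

theorem stepB_inv (dp0 : List (List Int)) (M N : Nat)
    (hM : M < dp0.length) (hN : ∀ row ∈ dp0, N < row.length)
    (hbr : ∀ j ≤ N, cellAt dp0 0 j ≠ -1) (hbc : ∀ i ≤ M, cellAt dp0 i 0 ≠ -1)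
    (i j : Nat) (hi : i ≤ M) (hj : j ≤ N) (dpc : List (List Int))
    (h : InvB dp0 dpc N i j) : InvB dp0 (stepB dpc (i : Int) (j : Int)) N i (j + 1) := by
  obtain ⟨h1, h2, h3⟩ := h
  have hin : ∀ a b : Nat, a ≤ M → b ≤ N → a < dpc.length ∧ b < (dpc.getD a []).length := by
    intro a b ha hb
    have ha' : a < dp0.length := by omega
    have hrow : dp0.getD a [] = dp0[a] := by
      rw [List.getD_eq_getElem?_getD, List.getElem?_eq_getElem ha']; rfl
    have hb' := hN dp0[a] (List.getElem_mem ha')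
    refine ⟨by rw [h1]; omega, ?_⟩
    rw [h2 a, hrow]; omega
  obtain ⟨hia, hja⟩ := hin i j hi hj
  have huc : cellAt dpc i j = cellAt dp0 i j := (h3 i j).2 (by omega)
  unfold stepB
  rw [pyGet2_nat dpc i j hia hja]
  dsimp only
  by_cases hc : cellAt dpc i j = -1
  · rw [if_pos hc]
    have h00 : cellAt dp0 i j = -1 := by rw [← huc]; exact hc
    have hi0 : i ≠ 0 := by rintro rfl; exact hbr j hj h00
    have hj0 : j ≠ 0 := by rintro rfl; exact hbc i hi h00
    have hc1 : ((i : Int) - 1) = ((i - 1 : Nat) : Int) := by omega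
    have hc2 : ((j : Int) - 1) = ((j - 1 : Nat) : Int) := by omega
    rw [hc1, hc2]
    obtain ⟨hib, hjb⟩ := hin (i - 1) j (by omega) hj
    obtain ⟨hic, hjc⟩ := hin i (j - 1) hi (by omega)
    rw [pyGet2_nat dpc (i - 1) j hib hjb, pyGet2_nat dpc i (j - 1) hic hjc]
    dsimp only
    have hga : cellAt dpc (i - 1) j = gval dp0 (i - 1) j := (h3 (i - 1) j).1 (by omega)
    have hgb : cellAt dpc i (j - 1) = gval dp0 i (j - 1) := (h3 i (j - 1)).1 (by omega)
    rw [pySet2_nat dpc i j _ hia hja, hga, hgb,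
      (gval_rec dp0 i j h00 hi0 hj0).symm]
    refine ⟨by rw [length_tblSet, h1], fun a => by rw [rowlen_tblSet _ _ _ _ _ hia]; exact h2 a, ?_⟩
    intro a b
    rw [cellAt_tblSet dpc i j _ a b hia hja]
    constructor
    · intro hp
      split_ifs with hab
      · obtain ⟨rfl, rfl⟩ := hab; rfl
      · exact (h3 a b).1 (by omega)
    · intro hp
      rw [if_neg (by omega)]
      exact (h3 a b).2 (by omega)
  · rw [if_neg hc]
    refine ⟨h1, h2, ?_⟩
    intro a b
    constructor
    · intro hp
      by_cases hab : a = i ∧ b = j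
      · obtain ⟨rfl, rfl⟩ := hab
        rw [huc, gval, if_pos (by rw [← huc]; exact hc)]
      · exact (h3 a b).1 (by omega)
    · intro hp
      exact (h3 a b).2 (by omega)

theorem innerB_inv (dp0 : List (List Int)) (M N : Nat)
    (hM : M < dp0.length) (hN : ∀ row ∈ dp0, N < row.length)
    (hbr : ∀ j ≤ N, cellAt dp0 0 j ≠ -1) (hbc : ∀ i ≤ M, cellAt dp0 i 0 ≠ -1)
    (i : Nat) (hi : i ≤ M) (dpc : List (List Int))
    (h : InvB dp0 dpc N i 0) : InvB dp0 (innerB (N : Int) dpc (i : Int)) N i (N + 1) := by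
  unfold innerB
  rw [show ((N : Int) + 1) = ((N + 1 : Nat) : Int) by omega,
    PySem.List.pyRange_zero_natCast, List.foldl_map]
  have main : ∀ t, t ≤ N + 1 →
      InvB dp0 (List.foldl (fun acc2 k => stepB acc2 (i : Int) ((k : Nat) : Int)) dpc
        (List.range t)) N i t := by
    intro t
    induction t with
    | zero => intro _; simpa using h
    | succ t iht =>
      intro ht
      rw [List.range_succ, List.foldl_append]
      exact stepB_inv dp0 M N hM hN hbr hbc i t hi (by omega) _ (iht (by omega))
  exact main (N + 1) le_rfl

theorem outer_inv (dp0 : List (List Int)) (M N : Nat)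
    (hM : M < dp0.length) (hN : ∀ row ∈ dp0, N < row.length)
    (hbr : ∀ j ≤ N, cellAt dp0 0 j ≠ -1) (hbc : ∀ i ≤ M, cellAt dp0 i 0 ≠ -1) :
    ∀ t, t ≤ M + 1 →
      InvB dp0 (List.foldl (fun acc k => innerB (N : Int) acc ((k : Nat) : Int)) dp0
        (List.range t)) N t 0 := by
  intro t
  induction t with
  | zero => intro _; simpa using invB_init dp0 N
  | succ t iht =>
    intro ht
    rw [List.range_succ, List.foldl_append]
    exact invB_shift dp0 _ N t
      (innerB_inv dp0 M N hM hN hbr hbc t (by omega) _ (iht (by omega)))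

theorem pyGet?_inRange {α : Type} (xs : List α) (i : Int) (d : α)
    (h : PySem.Raise.InRange xs.length i) :
    PySem.List.pyGet? xs i = some (PySem.List.pyGetD xs i d) := by
  unfold PySem.List.pyGetD
  cases hx : PySem.List.pyGet? xs i with
  | none => exact absurd h ((PySem.List.pyGet?_eq_none_iff xs i).mp hx)
  | some v => rfl

theorem solve_eq_alt (dp : List (List Int)) (n : Int) (m : Int)
    (hpre : Pre_solve dp n m) : solve dp n m = solve_alt dp n m := by
  obtain ⟨hrI, hcI, hdisj⟩ := hpre
  have hget : pyGet2 dp m n = some (PySem.List.pyGetD (PySem.List.pyGetD dp m []) n 0) := by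
    unfold pyGet2
    rw [pyGet?_inRange dp m [] hrI, Option.bind_some, pyGet?_inRange _ n 0 hcI]
  by_cases hv : PySem.List.pyGetD (PySem.List.pyGetD dp m []) n 0 ≠ -1
  · -- the cell is already cached: both programs return it unchanged
    unfold solve solve_alt
    rw [show solveA (n.toNat + m.toNat + 1) dp n m =
      (match pyGet2 dp m n with
        | none => (0, dp)
        | some v =>
          if v ≠ -1 then (v, dp)
          else
            match pyGet2 dp (m - 1) n, pyGet2 dp m (n - 1) with
            | none, _ => (0, dp)
            | _, none => (0, dp)
            | some a, some b =>
              if a ≠ -1 ∧ b ≠ -1 then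
                let w := PySem.Int.mod (a + b) 1000000007
                (w, pySet2 dp m n w)
              else
                let r1 := solveA (n.toNat + m.toNat) dp n (m - 1)
                let dp2 := pySet2 r1.2 (m - 1) n r1.1
                let r2 := solveA (n.toNat + m.toNat) dp2 (n - 1) m
                let dp4 := pySet2 r2.2 m (n - 1) r2.1
                match pyGet2 dp4 (m - 1) n, pyGet2 dp4 m (n - 1) with
                | some a', some b' =>
                  let w := PySem.Int.mod (a' + b') 1000000007
                  (w, pySet2 dp4 m n w)
                | _, _ => (0, dp4)) from rfl]
    rw [hget]
    dsimp only
    rw [if_pos hv, if_pos hv]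
  · -- dp[m][n] = -1: 0 ≤ m, 0 ≤ n and the base row/column is filled
    obtain ⟨hm0, hn0, hrows, hbr, hbc⟩ := hdisj.resolve_left hv
    obtain ⟨M, rfl⟩ : ∃ M : Nat, (M : Int) = m := ⟨m.toNat, Int.toNat_of_nonneg hm0⟩
    obtain ⟨N, rfl⟩ : ∃ N : Nat, (N : Int) = n := ⟨n.toNat, Int.toNat_of_nonneg hn0⟩
    simp only [Int.toNat_natCast] at hrows hbr hbc
    have hmlen : M < dp.length := by
      obtain ⟨_, h2⟩ := hrI; exact_mod_cast h2
    have hrowM : dp.getD M [] = dp[M] := by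
      rw [List.getD_eq_getElem?_getD, List.getElem?_eq_getElem hmlen]; rfl
    have hj1 : N < (dp.getD M []).length := by
      rw [hrowM]; exact hrows dp[M] (List.getElem_mem hmlen)
    have hcell : PySem.List.pyGetD (PySem.List.pyGetD dp (M : Int) []) (N : Int) 0
        = cellAt dp M N := by
      rw [PySem.List.pyGetD_natCast, PySem.List.pyGetD_natCast]; rfl
    have hveq : cellAt dp M N = -1 := by rw [← hcell]; exact not_not.mp hv
    rw [hcell] at hget
    have hA := (solveA_main dp M N hmlen hrows hbr hbc (N + M + 1) M N dp le_rfl le_rfl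
      (by omega) (tblExt_refl dp)).1
    unfold solve solve_alt
    simp only [Int.toNat_natCast]
    rw [hA, hget]
    dsimp only
    rw [if_neg (by omega)]
    rw [show ((M : Int) + 1) = ((M + 1 : Nat) : Int) by omega,
      PySem.List.pyRange_zero_natCast, List.foldl_map]
    obtain ⟨k1, k2, k3⟩ := outer_inv dp M N hmlen hrows hbr hbc (M + 1) le_rfl
    set dp' := List.foldl (fun acc k => innerB (N : Int) acc ((k : Nat) : Int)) dp
      (List.range (M + 1)) with hdp'
    have hcell' : cellAt dp' M N = gval dp M N := (k3 M N).1 (by omega)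
    have hi' : M < dp'.length := by rw [k1]; exact hmlen
    have hj' : N < (dp'.getD M []).length := by rw [k2 M]; exact hj1
    rw [pyGet2_nat dp' M N hi' hj']
    dsimp only
    exact hcell'.symm

-- ===== VERDICT (by name: the statement is the Claim_ definition above) =====
theorem solve_spec : Claim_equal_solve := by
  intro dp n m _ hpre
  exact solve_eq_alt dp n m hpre
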